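-- pv_equiv track=rewrite | github.com/SamiSipilae/code-jam | code jam/code jam 2/1/solve.py | find_thickest
-- ===== SOURCE A (Python) =====
-- def find_thickest(list):
-- 	cur=0
-- 	val=0
-- 	for item in list:
-- 		if item[1]>val:
-- 			val = item[1]
-- 			cur =list.index(item)
-- 	return cur
-- ===== SOURCE B (Python) =====
-- def find_thickest(list):
--     best = 0
--     for item in list:
--         if item[1] > best:
--             best = item[1]
--     if best == 0:
--         return 0
--     i = 0
--     for item in list:
--         if item[1] == best:
--             return i
--         i += 1
--     return 0
-- ===== Notes on version B (the rewrite author's own statement) =====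
-- stated objective: simpler
-- what changed: Replaces A's fused scan that maintains a running max and re-finds each improving item with list.index (a nested scan) by two plain passes: first compute the maximum second field (floored at 0), then return the position of its first occurrence via a single enumeration; no list.index calls remain.
import Mathlib
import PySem

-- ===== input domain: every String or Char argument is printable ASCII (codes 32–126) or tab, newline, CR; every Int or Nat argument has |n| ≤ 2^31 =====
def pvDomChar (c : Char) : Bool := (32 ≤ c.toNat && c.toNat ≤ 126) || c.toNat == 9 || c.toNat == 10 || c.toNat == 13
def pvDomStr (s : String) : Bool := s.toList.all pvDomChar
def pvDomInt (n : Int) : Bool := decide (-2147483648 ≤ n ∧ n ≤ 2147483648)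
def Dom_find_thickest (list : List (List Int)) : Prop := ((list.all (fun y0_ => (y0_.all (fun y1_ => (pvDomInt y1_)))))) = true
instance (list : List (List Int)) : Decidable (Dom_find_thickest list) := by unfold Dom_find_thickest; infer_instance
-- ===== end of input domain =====

-- B replaces A's fused running-max scan with list.index re-search by two plain passes
-- (max of the second fields, then first position attaining it): simpler, no nested scan.


-- item[1] as A reads it (Pre_ guarantees the index is in range, so getD is never taken outside it)
def ftField (item : List Int) : Int := (PySem.List.pyGet? item 1).getD 0

-- ===== PORT A =====
-- one fused pass: state (cur, val); on a strict improvement cur := list.index(item)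
def find_thickest (list : List (List Int)) : Int :=
  (list.foldl
    (fun (st : Int × Int) item =>
      if ftField item > st.2 then
        (((PySem.List.index? list item).getD 0 : Nat), ftField item)
      else st)
    (0, 0)).1

-- ===== PORT B =====
-- second pass of Source B: first position (counting from i) whose second field equals best
def ftFind (best : Int) : List (List Int) → Int → Int
  | [], _ => 0
  | item :: rest, i => if ftField item = best then i else ftFind best rest (i + 1)

def find_thickest_alt (list : List (List Int)) : Int :=
  let best := list.foldl (fun b item => if ftField item > b then ftField item else b) 0
  if best = 0 then 0 else ftFind best list 0

-- ===== PRECONDITION & SPEC =====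
-- Pre_ excludes exactly the inputs where Python A raises IndexError (an item with fewer than 2 elements)
def Pre_find_thickest (list : List (List Int)) : Prop := ∀ item ∈ list, 2 ≤ item.length
instance (list : List (List Int)) : Decidable (Pre_find_thickest list) := by unfold Pre_find_thickest; infer_instance
def pvWitness_find_thickest : List (List Int) := [[5, 2], [9, 2], [1, 3], [0, 3]]

def Spec_find_thickest (list : List (List Int)) (out : Int) : Prop := out = find_thickest_alt list
instance (list : List (List Int)) (out : Int) : Decidable (Spec_find_thickest list out) := by unfold Spec_find_thickest; infer_instance

-- ===== CLAIM (what is proved, stated in full; the proofs are below) =====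
def Claim_equal_find_thickest : Prop := ∀ (list : List (List Int)), Dom_find_thickest list → Pre_find_thickest list → Spec_find_thickest list (find_thickest list)

-- ===== LEMMAS AND PROOFS =====

-- position-tracking reference for A's loop
def ftSpecFold : List (List Int) → Int → Int × Int → Int × Int
  | [], _, st => st
  | item :: s, i, (c, v) =>
      ftSpecFold s (i + 1) (if ftField item > v then (i, ftField item) else (c, v))

theorem ftMax_le (s : List (List Int)) (v : Int) :
    v ≤ s.foldl (fun b item => if ftField item > b then ftField item else b) v := by
  induction s generalizing v with
  | nil => simp
  | cons it s ih =>
      simp only [List.foldl]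
      split_ifs with h
      · exact le_trans (le_of_lt h) (ih _)
      · exact ih v

-- A's fold equals the position-tracking reference (the index? lookup finds the current position)
theorem ftA_spec (l : List (List Int)) :
    ∀ (s p : List (List Int)) (c v : Int), l = p ++ s → (∀ it ∈ p, ftField it ≤ v) →
    s.foldl
      (fun (st : Int × Int) item =>
        if ftField item > st.2 then
          (((PySem.List.index? l item).getD 0 : Nat), ftField item)
        else st)
      (c, v) = ftSpecFold s (↑p.length) (c, v) := by
  intro s
  induction s with
  | nil => intro p c v _ _; simp [ftSpecFold]
  | cons it s ih =>
      intro p c v hl hp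
      simp only [List.foldl, ftSpecFold]
      by_cases h : ftField it > v
      · have hnot : it ∉ p := by
          intro hm
          exact absurd (hp it hm) (by simpa using h)
        have hidx : PySem.List.index? l it = some p.length := by
          have h1 : PySem.List.index? (p ++ [it]) it = some p.length :=
            PySem.List.index?_append_singleton_self (l := p) (c := it) hnot
          have h2 : l = (p ++ [it]) ++ s := by simp [hl]
          rw [h2, PySem.List.index?_append_of_mem s (by simp), h1]
        rw [if_pos h, if_pos h, hidx]
        have := ih (p ++ [it]) (↑p.length) (ftField it)
          (by simp [hl]) (by
            intro x hx
            rcases List.mem_append.mp hx with hx | hx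
            · exact le_trans (hp x hx) (le_of_lt h)
            · simp at hx; simp [hx])
        simpa [Option.getD] using this
      · rw [if_neg h, if_neg h]
        have := ih (p ++ [it]) c v (by simp [hl])
          (by
            intro x hx
            rcases List.mem_append.mp hx with hx | hx
            · exact hp x hx
            · simp at hx; simp [hx, not_lt.mp h])
        simpa using this

-- the reference fold in terms of B's two passes
theorem ftSpec_eq (s : List (List Int)) :
    ∀ (i c v : Int),
    ftSpecFold s i (c, v) =
      (let M := s.foldl (fun b item => if ftField item > b then ftField item else b) v
       ((if M > v then ftFind M s i else c), M)) := by
  induction s with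
  | nil => intro i c v; simp [ftSpecFold]
  | cons it s ih =>
      intro i c v
      simp only [ftSpecFold, List.foldl, ftFind]
      by_cases h : ftField it > v
      · simp only [if_pos h]
        rw [ih (i + 1) i (ftField it)]
        have hM : ftField it ≤ s.foldl (fun b item => if ftField item > b then ftField item else b) (ftField it) :=
          ftMax_le s _
        simp only
        by_cases he : ftField it = s.foldl (fun b item => if ftField item > b then ftField item else b) (ftField it)
        · rw [if_neg (by omega), if_pos (by omega), if_pos he]
        · rw [if_pos (by omega), if_pos (by omega), if_neg he]
      · simp only [if_neg h]
        rw [ih (i + 1) c v]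
        simp only
        by_cases hM : s.foldl (fun b item => if ftField item > b then ftField item else b) v > v
        · rw [if_pos hM, if_pos hM, if_neg (by intro hh; omega)]
        · rw [if_neg hM, if_neg hM]

-- ===== VERDICT (by name: the statement is the Claim_ definition above) =====
theorem find_thickest_spec : Claim_equal_find_thickest := by
  intro l _ _
  unfold Spec_find_thickest find_thickest find_thickest_alt
  rw [ftA_spec l l [] 0 0 rfl (by simp)]
  simp only [List.length_nil, Nat.cast_zero]
  rw [ftSpec_eq l 0 0 0]
  have h0 : (0 : Int) ≤ l.foldl (fun b item => if ftField item > b then ftField item else b) 0 :=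
    ftMax_le l 0
  simp only
  by_cases h : l.foldl (fun b item => if ftField item > b then ftField item else b) 0 = 0
  · rw [if_neg (by omega), if_pos h]
  · rw [if_pos (by omega), if_neg h]
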